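-- pv_equiv track=rewrite | github.com/amunc/RIASC_Removing_Redundancies_Tools | RTRR_tool/RTRR_scripts/utilities_redundancy_t1.py | comparar_instancias
-- ===== SOURCE A (Python) =====
-- def comparar_instancias(matriz_general_pesos):
--     palabra_reservada = "'nan'"
--     instancia_resultado = []
--     for instancias in range(len(matriz_general_pesos)):
--         if instancias == 0 : # si la instancia es la primera, la igualamos a la instancia resultado
--             for fila_instancia in range(len(matriz_general_pesos[0])):
--                 fila_instancia_resultado =[]
--                 for columna_instancia in range(len(matriz_general_pesos[0][fila_instancia])):
--                     fila_instancia_resultado.append(matriz_general_pesos[0][fila_instancia][columna_instancia])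
--                 instancia_resultado.append(fila_instancia_resultado)
--
--         else:# tenemos una instancia completa, comparamos con la siguiente
--             for fila_instancia in range(len(matriz_general_pesos[instancias])):
--                 for columna_instancia in range(len(matriz_general_pesos[instancias][fila_instancia])):
--                     if(instancia_resultado[fila_instancia][columna_instancia] == palabra_reservada):
--                         if(matriz_general_pesos[instancias][fila_instancia][columna_instancia] != palabra_reservada):
--                             instancia_resultado[fila_instancia][columna_instancia] = matriz_general_pesos[instancias][fila_instancia][columna_instancia]
--     return instancia_resultado
-- ===== SOURCE B (Python) =====
-- def comparar_instancias(matriz_general_pesos):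
--     N = "'nan'"
--     if not matriz_general_pesos:
--         return []
--     out = [[N] * len(row) for row in matriz_general_pesos[0]]
--     for inst in reversed(matriz_general_pesos):
--         for r in range(len(inst)):
--             for c in range(len(inst[r])):
--                 if inst[r][c] != N:
--                     out[r][c] = inst[r][c]
--     return out
-- ===== Notes on version B (the rewrite author's own statement) =====
-- stated objective: alternative
-- what changed: Replaces A's copy-instance-0-then-patch-each-later-instance flow (which tests every accumulated cell for 'nan' before overwriting) with a reverse pass that paints every non-'nan' cell of each instance, from last to first, over an all-'nan' canvas of instance 0's shape, so the first non-'nan' value wins with no copy step and no test of merged cells.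
import Mathlib
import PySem

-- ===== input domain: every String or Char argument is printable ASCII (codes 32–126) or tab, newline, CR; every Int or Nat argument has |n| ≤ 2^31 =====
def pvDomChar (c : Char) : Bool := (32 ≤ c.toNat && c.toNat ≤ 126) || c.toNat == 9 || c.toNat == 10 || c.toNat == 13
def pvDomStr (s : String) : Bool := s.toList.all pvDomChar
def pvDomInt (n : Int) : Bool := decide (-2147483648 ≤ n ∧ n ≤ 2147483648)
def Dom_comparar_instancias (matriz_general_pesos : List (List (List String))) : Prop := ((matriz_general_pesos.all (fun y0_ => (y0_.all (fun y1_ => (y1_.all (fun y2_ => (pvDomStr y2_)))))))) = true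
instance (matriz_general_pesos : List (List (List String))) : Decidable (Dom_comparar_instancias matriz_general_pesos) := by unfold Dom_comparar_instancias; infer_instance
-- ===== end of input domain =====

-- B replaces A's copy-then-patch-per-instance flow with a reverse pass that paints each
-- non-'nan' value over an all-'nan' canvas of instance 0's shape (objective: alternative).

def pvNan : String := "'nan'"

-- ===== PORT A =====
-- A-side helper: the `instancias == 0` branch — copy instance 0's rows cell by cell
def pvCopia (inst0 : List (List String)) (instancia_resultado : List (List String)) : List (List String) :=
  (List.range inst0.length).foldl
    (fun res fila =>
      res ++ [(List.range ((inst0.getD fila []).length)).foldl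
          (fun fr col => fr ++ [(inst0.getD fila []).getD col ""]) []])
    instancia_resultado

-- A-side helper: the else branch — patch 'nan' cells of the accumulated result in place
-- from one later instance `inst`, iterating over `inst`'s own dimensions
def pvMergeInst (instancia_resultado : List (List String)) (inst : List (List String)) : List (List String) :=
  (List.range inst.length).foldl
    (fun res fila =>
      (List.range ((inst.getD fila []).length)).foldl
        (fun res2 col =>
          if (res2.getD fila []).getD col "" = pvNan ∧ (inst.getD fila []).getD col "" ≠ pvNan then
            res2.set fila ((res2.getD fila []).set col ((inst.getD fila []).getD col ""))
          else res2)
        res)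
    instancia_resultado

-- literal transliteration: outer loop over instance indices with the two branches above
def comparar_instancias (matriz_general_pesos : List (List (List String))) : List (List String) :=
  (List.range matriz_general_pesos.length).foldl
    (fun instancia_resultado instancias =>
      if instancias = 0 then pvCopia (matriz_general_pesos.getD 0 []) instancia_resultado
      else pvMergeInst instancia_resultado (matriz_general_pesos.getD instancias []))
    []

-- ===== PORT B =====
-- B-side helper: Source B's per-instance pass — paint every non-'nan' cell of `inst` onto `out`
def pvPaintInst (out inst : List (List String)) : List (List String) :=
  (List.range inst.length).foldl
    (fun out r =>
      (List.range ((inst.getD r []).length)).foldl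
        (fun out2 c =>
          if (inst.getD r []).getD c "" ≠ pvNan then
            out2.set r ((out2.getD r []).set c ((inst.getD r []).getD c ""))
          else out2)
        out)
    out

def comparar_instancias_alt (matriz_general_pesos : List (List (List String))) : List (List String) :=
  match matriz_general_pesos with
  | [] => []
  | inst0 :: _ =>
    matriz_general_pesos.reverse.foldl pvPaintInst
      (inst0.map (fun row => List.replicate row.length pvNan))

-- ===== PRECONDITION & SPEC =====
-- Pre_ excludes exactly the inputs where A raises IndexError: a later instance with a row
-- longer than instance 0's corresponding row, or extra non-empty rows beyond instance 0's rows.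
def Pre_comparar_instancias (matriz_general_pesos : List (List (List String))) : Prop :=
  ∀ inst ∈ matriz_general_pesos.tail,
    (∀ pr ∈ inst.zip (matriz_general_pesos.headD []), pr.1.length ≤ pr.2.length) ∧
    (∀ row ∈ inst.drop (matriz_general_pesos.headD []).length, row = [])
instance (matriz_general_pesos : List (List (List String))) : Decidable (Pre_comparar_instancias matriz_general_pesos) := by unfold Pre_comparar_instancias; infer_instance

def pvWitness_comparar_instancias : List (List (List String)) :=
  [[["'nan'", "a"], ["'nan'"]], [["b", "'nan'"], ["c"]]]

def Spec_comparar_instancias (matriz_general_pesos : List (List (List String))) (out : List (List String)) : Prop := out = comparar_instancias_alt matriz_general_pesos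
instance (matriz_general_pesos : List (List (List String))) (out : List (List String)) : Decidable (Spec_comparar_instancias matriz_general_pesos out) := by unfold Spec_comparar_instancias; infer_instance

-- ===== CLAIM (what is proved, stated in full; the proofs are below) =====
def Claim_equal_comparar_instancias : Prop := ∀ (matriz_general_pesos : List (List (List String))), Dom_comparar_instancias matriz_general_pesos → Pre_comparar_instancias matriz_general_pesos → Spec_comparar_instancias matriz_general_pesos (comparar_instancias matriz_general_pesos)

-- ===== LEMMAS AND PROOFS =====

-- proof-side guarded variant of the per-cell scan: the bounds checks made explicit
def pvFirstValG (m : List (List (List String))) (r c : Nat) : String :=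
  match m.find? (fun inst => decide (r < inst.length) && decide (c < (inst.getD r []).length)
                  && ((inst.getD r []).getD c "" != pvNan)) with
  | some inst => (inst.getD r []).getD c ""
  | none => pvNan


lemma pv_foldl_fix {α β : Type} (f : β → α → β) (b : β) (l : List α) (h : ∀ x, f b x = b) :
    l.foldl f b = b := by
  induction l with
  | nil => rfl
  | cons x xs ih => rw [List.foldl_cons, h]; exact ih

lemma pv_foldl_congr {α β : Type} (l : List α) (f g : β → α → β) (b c : β)
    (hb : b = c) (h : ∀ y x, f y x = g y x) : l.foldl f b = l.foldl g c := by
  subst hb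
  have : f = g := funext fun y => funext fun x => h y x
  rw [this]

lemma pv_getD_set_ne {α : Type} (l : List α) (i j : Nat) (a d : α) (h : i ≠ j) :
    (l.set i a).getD j d = l.getD j d := by
  simp [List.getD_eq_getElem?_getD, List.getElem?_set_ne h]

lemma pv_map_range_getD {α : Type} (l : List α) (d : α) :
    (List.range l.length).map (fun i => l.getD i d) = l := by
  apply List.ext_getElem
  · simp
  · intro i h1 h2
    simp [List.getElem?_eq_getElem h2]

lemma pv_foldl_range_getD {α β : Type} (l : List α) (d : α) (f : β → α → β) (b : β) :
    (List.range l.length).foldl (fun r i => f r (l.getD i d)) b = l.foldl f b := by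
  induction l generalizing b with
  | nil => rfl
  | cons x xs ih =>
    rw [List.length_cons, List.range_succ_eq_map, List.foldl_cons, List.foldl_map]
    simpa [List.getD_cons_succ] using ih (f b x)

lemma pv_rowcopy (row : List String) :
    (List.range row.length).foldl (fun fr col => fr ++ [row.getD col ""]) [] = row := by
  rw [PySem.List.foldl_append_singleton_eq_map, pv_map_range_getD]
  rfl

lemma pv_empty_ne_nan : ("" : String) ≠ pvNan := by decide

lemma pv_copia_nil (inst0 : List (List String)) : pvCopia inst0 [] = inst0 := by
  unfold pvCopia
  rw [pv_foldl_congr (List.range inst0.length) _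
      (fun res fila => res ++ [inst0.getD fila []]) _ _ rfl
      (fun y x => by rw [pv_rowcopy])]
  rw [PySem.List.foldl_append_singleton_eq_map, pv_map_range_getD]
  rfl

-- the per-row column patch loop, as a function of the row alone
def pvRowMerge (row irow : List String) : List String :=
  (List.range irow.length).foldl
    (fun row2 col => if row2.getD col "" = pvNan ∧ irow.getD col "" ≠ pvNan
                     then row2.set col (irow.getD col "") else row2) row

lemma pvRowMerge_nilrow (irow : List String) : pvRowMerge [] irow = [] := by
  unfold pvRowMerge
  apply pv_foldl_fix
  intro col
  rw [if_neg]
  rintro ⟨h1, -⟩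
  exact pv_empty_ne_nan (by simpa using h1)

lemma pv_colfold_length (row irow : List String) (k : Nat) :
    ((List.range k).foldl
      (fun row2 col => if row2.getD col "" = pvNan ∧ irow.getD col "" ≠ pvNan
                       then row2.set col (irow.getD col "") else row2) row).length = row.length := by
  induction k with
  | zero => rfl
  | succ k ih =>
    rw [List.range_succ, List.foldl_append, List.foldl_cons, List.foldl_nil]
    split
    · rw [List.length_set]; exact ih
    · exact ih

lemma pv_colfold_getD (row irow : List String) (k : Nat) (c : Nat) :
    ((List.range k).foldl
      (fun row2 col => if row2.getD col "" = pvNan ∧ irow.getD col "" ≠ pvNan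
                       then row2.set col (irow.getD col "") else row2) row).getD c "" =
    if c < k ∧ row.getD c "" = pvNan ∧ irow.getD c "" ≠ pvNan then irow.getD c ""
    else row.getD c "" := by
  induction k generalizing c with
  | zero => simp
  | succ k ih =>
    rw [List.range_succ, List.foldl_append, List.foldl_cons, List.foldl_nil]
    have hGk : ((List.range k).foldl
        (fun row2 col => if row2.getD col "" = pvNan ∧ irow.getD col "" ≠ pvNan
                         then row2.set col (irow.getD col "") else row2) row).getD k "" =
        row.getD k "" := by
      rw [ih k]; simp
    by_cases hc : row.getD k "" = pvNan ∧ irow.getD k "" ≠ pvNan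
    · rw [if_pos (by rw [hGk]; exact hc)]
      have hklen : k < row.length := by
        by_contra hk
        exact pv_empty_ne_nan ((List.getD_eq_default row "" (show row.length ≤ k by omega)) ▸ hc.1)
      by_cases hck : c = k
      · subst hck
        rw [if_pos ⟨Nat.lt_succ_self c, hc⟩]
        rw [List.getD_eq_getElem _ ""
            (by rw [List.length_set, pv_colfold_length]; exact hklen)]
        simp [List.getElem_set_self]
      · rw [pv_getD_set_ne _ k c _ _ (fun hkc => hck hkc.symm), ih c]
        by_cases h2 : row.getD c "" = pvNan ∧ irow.getD c "" ≠ pvNan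
        · by_cases hck2 : c < k
          · rw [if_pos ⟨hck2, h2⟩, if_pos ⟨by omega, h2⟩]
          · rw [if_neg (by rintro ⟨h1, -⟩; omega), if_neg (by rintro ⟨h1, -⟩; omega)]
        · rw [if_neg (by rintro ⟨-, hh⟩; exact h2 hh), if_neg (by rintro ⟨-, hh⟩; exact h2 hh)]
    · rw [if_neg (by rw [hGk]; exact hc), ih c]
      by_cases hck : c = k
      · subst hck
        rw [if_neg (by rintro ⟨h1, -⟩; omega), if_neg (by rintro ⟨-, h2⟩; exact hc h2)]
      · by_cases h2 : row.getD c "" = pvNan ∧ irow.getD c "" ≠ pvNan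
        · by_cases hck2 : c < k
          · rw [if_pos ⟨hck2, h2⟩, if_pos ⟨by omega, h2⟩]
          · rw [if_neg (by rintro ⟨h1, -⟩; omega), if_neg (by rintro ⟨h1, -⟩; omega)]
        · rw [if_neg (by rintro ⟨-, hh⟩; exact h2 hh), if_neg (by rintro ⟨-, hh⟩; exact h2 hh)]

lemma pvRowMerge_length (row irow : List String) : (pvRowMerge row irow).length = row.length :=
  pv_colfold_length row irow irow.length

lemma pvRowMerge_getD (row irow : List String) (c : Nat) :
    (pvRowMerge row irow).getD c "" =
    if c < irow.length ∧ row.getD c "" = pvNan ∧ irow.getD c "" ≠ pvNan then irow.getD c ""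
    else row.getD c "" :=
  pv_colfold_getD row irow irow.length c

-- the inner column loop of A only ever rewrites row `fila`
lemma pv_colfold_set (res : List (List String)) (irow : List String) (fila : Nat)
    (h : fila < res.length) (k : Nat) :
    (List.range k).foldl
      (fun res2 col => if (res2.getD fila []).getD col "" = pvNan ∧ irow.getD col "" ≠ pvNan
                       then res2.set fila ((res2.getD fila []).set col (irow.getD col ""))
                       else res2) res =
    res.set fila ((List.range k).foldl
      (fun row2 col => if row2.getD col "" = pvNan ∧ irow.getD col "" ≠ pvNan
                       then row2.set col (irow.getD col "") else row2) (res.getD fila [])) := by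
  induction k with
  | zero =>
    rw [List.range_zero, List.foldl_nil, List.foldl_nil,
        List.getD_eq_getElem res [] h, List.set_getElem_self]
  | succ k ih =>
    rw [List.range_succ, List.foldl_append, List.foldl_append, List.foldl_cons, List.foldl_cons,
        List.foldl_nil, List.foldl_nil, ih]
    have hget : ((res.set fila ((List.range k).foldl
        (fun row2 col => if row2.getD col "" = pvNan ∧ irow.getD col "" ≠ pvNan
                         then row2.set col (irow.getD col "") else row2)
        (res.getD fila []))).getD fila []) =
        (List.range k).foldl
          (fun row2 col => if row2.getD col "" = pvNan ∧ irow.getD col "" ≠ pvNan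
                           then row2.set col (irow.getD col "") else row2) (res.getD fila []) := by
      rw [List.getD_eq_getElem _ [] (by rw [List.length_set]; exact h)]
      simp
    rw [hget]
    split
    · rw [List.set_set]
    · rfl

-- A's one-instance patch pass: the first k rows, generalized
lemma pv_mergeInst_aux (res inst : List (List String)) (k : Nat) :
    (((List.range k).foldl
      (fun res fila =>
        (List.range ((inst.getD fila []).length)).foldl
          (fun res2 col =>
            if (res2.getD fila []).getD col "" = pvNan ∧ (inst.getD fila []).getD col "" ≠ pvNan then
              res2.set fila ((res2.getD fila []).set col ((inst.getD fila []).getD col ""))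
            else res2)
          res)
      res).length = res.length) ∧
    (∀ r, ((List.range k).foldl
      (fun res fila =>
        (List.range ((inst.getD fila []).length)).foldl
          (fun res2 col =>
            if (res2.getD fila []).getD col "" = pvNan ∧ (inst.getD fila []).getD col "" ≠ pvNan then
              res2.set fila ((res2.getD fila []).set col ((inst.getD fila []).getD col ""))
            else res2)
          res)
      res).getD r [] =
        if r < k then pvRowMerge (res.getD r []) (inst.getD r []) else res.getD r []) := by
  induction k with
  | zero => exact ⟨rfl, fun r => by simp⟩
  | succ k ih =>
    obtain ⟨ihlen, ihget⟩ := ih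
    rw [List.range_succ, List.foldl_append, List.foldl_cons, List.foldl_nil]
    have hGk : ((List.range k).foldl
      (fun res fila =>
        (List.range ((inst.getD fila []).length)).foldl
          (fun res2 col =>
            if (res2.getD fila []).getD col "" = pvNan ∧ (inst.getD fila []).getD col "" ≠ pvNan then
              res2.set fila ((res2.getD fila []).set col ((inst.getD fila []).getD col ""))
            else res2)
          res)
      res).getD k [] = res.getD k [] := by
      rw [ihget k]; simp
    by_cases hk : k < res.length
    · have hk' : k < ((List.range k).foldl
        (fun res fila =>
          (List.range ((inst.getD fila []).length)).foldl
            (fun res2 col =>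
              if (res2.getD fila []).getD col "" = pvNan ∧ (inst.getD fila []).getD col "" ≠ pvNan then
                res2.set fila ((res2.getD fila []).set col ((inst.getD fila []).getD col ""))
              else res2)
            res)
        res).length := by rw [ihlen]; exact hk
      rw [pv_colfold_set _ (inst.getD k []) k hk', hGk]
      constructor
      · rw [List.length_set]; exact ihlen
      · intro r
        by_cases hrk : r = k
        · subst hrk
          rw [List.getD_eq_getElem _ [] (by rw [List.length_set]; exact hk')]
          simp only [List.getElem_set_self]
          rw [if_pos (Nat.lt_succ_self r)]
          rfl
        · rw [pv_getD_set_ne _ k r _ _ (fun hkr => hrk hkr.symm), ihget r]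
          by_cases hrk2 : r < k
          · rw [if_pos hrk2, if_pos (by omega)]
          · rw [if_neg hrk2, if_neg (by omega)]
    · have hres : res.length ≤ k := by omega
      have hGres : ((List.range k).foldl
        (fun res fila =>
          (List.range ((inst.getD fila []).length)).foldl
            (fun res2 col =>
              if (res2.getD fila []).getD col "" = pvNan ∧ (inst.getD fila []).getD col "" ≠ pvNan then
                res2.set fila ((res2.getD fila []).set col ((inst.getD fila []).getD col ""))
              else res2)
            res)
        res).getD k [] = [] := by
        rw [hGk, List.getD_eq_default res [] hres]
      rw [pv_foldl_fix _ _ _ (fun col => by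
        rw [if_neg (by rw [hGres]; rintro ⟨h1, -⟩; exact pv_empty_ne_nan (by simpa using h1))])]
      refine ⟨ihlen, fun r => ?_⟩
      rw [ihget r]
      by_cases hrk : r = k
      · subst hrk
        rw [if_neg (by omega), if_pos (by omega)]
        rw [List.getD_eq_default res [] hres, pvRowMerge_nilrow]
      · by_cases hrk2 : r < k
        · rw [if_pos hrk2, if_pos (by omega)]
        · rw [if_neg hrk2, if_neg (by omega)]

lemma pv_mergeInst_spec (res inst : List (List String)) :
    (pvMergeInst res inst).length = res.length ∧
    ∀ r, (pvMergeInst res inst).getD r [] =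
      if r < inst.length then pvRowMerge (res.getD r []) (inst.getD r []) else res.getD r [] := by
  unfold pvMergeInst
  exact pv_mergeInst_aux res inst inst.length

-- step 1: A is the instance-0 copy followed by a left fold of the patch pass over the rest
lemma pv_A_eq_fold (inst0 : List (List String)) (rest : List (List (List String))) :
    comparar_instancias (inst0 :: rest) = rest.foldl pvMergeInst inst0 := by
  show (List.range (inst0 :: rest).length).foldl
      (fun instancia_resultado instancias =>
        if instancias = 0 then pvCopia ((inst0 :: rest).getD 0 []) instancia_resultado
        else pvMergeInst instancia_resultado ((inst0 :: rest).getD instancias [])) [] =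
      rest.foldl pvMergeInst inst0
  rw [List.length_cons, List.range_succ_eq_map, List.foldl_cons, List.foldl_map]
  refine (pv_foldl_congr (List.range rest.length) _
      (fun r i => pvMergeInst r (rest.getD i [])) _ inst0 ?_ ?_).trans
      (pv_foldl_range_getD rest [] pvMergeInst inst0)
  · show (if (0 : Nat) = 0 then pvCopia ((inst0 :: rest).getD 0 []) []
        else pvMergeInst [] ((inst0 :: rest).getD 0 [])) = inst0
    rw [if_pos rfl]
    exact pv_copia_nil inst0
  · intro y x
    show (if x + 1 = 0 then pvCopia ((inst0 :: rest).getD 0 []) y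
        else pvMergeInst y ((inst0 :: rest).getD (x + 1) [])) = pvMergeInst y (rest.getD x [])
    rw [if_neg (Nat.succ_ne_zero x)]
    rfl

-- step 2: the fold of patch passes computes the per-cell first non-'nan' value
lemma pv_char (inst0 : List (List String)) (l : List (List (List String))) :
    (l.foldl pvMergeInst inst0).length = inst0.length ∧
    (∀ r, ((l.foldl pvMergeInst inst0).getD r []).length = (inst0.getD r []).length) ∧
    (∀ r c, r < inst0.length → c < (inst0.getD r []).length →
      ((l.foldl pvMergeInst inst0).getD r []).getD c "" = pvFirstValG (inst0 :: l) r c) := by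
  induction l using List.reverseRecOn with
  | nil =>
    refine ⟨rfl, fun r => rfl, fun r c hr hc => ?_⟩
    unfold pvFirstValG
    simp only [List.find?_cons]
    by_cases hcell : (inst0.getD r []).getD c "" = pvNan
    · have h3 : ((inst0.getD r []).getD c "" != pvNan) = false := by simpa using hcell
      rw [h3, Bool.and_false]
      exact hcell
    · have h1 : decide (r < inst0.length) = true := by simpa using hr
      have h2 : decide (c < (inst0.getD r []).length) = true := by simpa using hc
      have h3 : ((inst0.getD r []).getD c "" != pvNan) = true := by simpa using hcell
      rw [h1, h2, h3]
      rfl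
  | append_singleton l' inst ih =>
    rw [List.foldl_append, List.foldl_cons, List.foldl_nil]
    obtain ⟨ihlen, ihrow, ihcell⟩ := ih
    obtain ⟨mlen, mget⟩ := pv_mergeInst_spec (l'.foldl pvMergeInst inst0) inst
    refine ⟨by rw [mlen, ihlen], ?_, ?_⟩
    · intro r
      rw [mget r]
      split
      · rw [pvRowMerge_length]; exact ihrow r
      · exact ihrow r
    · intro r c hr hc
      unfold pvFirstValG
      rw [show inst0 :: (l' ++ [inst]) = (inst0 :: l') ++ [inst] from rfl, List.find?_append]
      rw [mget r]
      cases hfind : (inst0 :: l').find? (fun inst => decide (r < inst.length)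
          && decide (c < (inst.getD r []).length) && ((inst.getD r []).getD c "" != pvNan)) with
      | some x =>
        have hx := List.find?_some hfind
        have hxcell : (x.getD r []).getD c "" ≠ pvNan := by
          simp only [Bool.and_eq_true, bne_iff_ne, ne_eq, decide_eq_true_eq] at hx
          exact hx.2
        have hR' : ((l'.foldl pvMergeInst inst0).getD r []).getD c "" = (x.getD r []).getD c "" := by
          have h0 := ihcell r c hr hc
          unfold pvFirstValG at h0
          rw [hfind] at h0
          exact h0
        split
        · rw [pvRowMerge_getD,
              if_neg (by rintro ⟨-, h2, -⟩; exact hxcell (hR' ▸ h2)), hR']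
          rfl
        · rw [hR']
          rfl
      | none =>
        have hR' : ((l'.foldl pvMergeInst inst0).getD r []).getD c "" = pvNan := by
          have h0 := ihcell r c hr hc
          unfold pvFirstValG at h0
          rw [hfind] at h0
          exact h0
        by_cases hrl : r < inst.length
        · rw [if_pos hrl, pvRowMerge_getD, hR']
          by_cases hcond : c < (inst.getD r []).length ∧ (inst.getD r []).getD c "" ≠ pvNan
          · rw [if_pos ⟨hcond.1, rfl, hcond.2⟩]
            have h1 : decide (r < inst.length) = true := by simpa using hrl
            have h2 : decide (c < (inst.getD r []).length) = true := by simpa using hcond.1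
            have h3 : ((inst.getD r []).getD c "" != pvNan) = true := by simpa using hcond.2
            simp only [Option.none_or, List.find?_cons]
            rw [h1, h2, h3]
            rfl
          · rw [if_neg (by rintro ⟨h1, -, h3⟩; exact hcond ⟨h1, h3⟩)]
            simp only [Option.none_or, List.find?_cons]
            rcases Decidable.em (c < (inst.getD r []).length) with h1 | h1
            · have h3 : (inst.getD r []).getD c "" = pvNan := by
                by_contra h3
                exact hcond ⟨h1, h3⟩
              have h3' : ((inst.getD r []).getD c "" != pvNan) = false := by simpa using h3
              rw [h3', Bool.and_false]
              rfl
            · have h2 : decide (c < (inst.getD r []).length) = false := by simpa using h1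
              rw [h2, Bool.and_false, Bool.false_and]
              rfl
        · rw [if_neg hrl, hR']
          have h1 : decide (r < inst.length) = false := by simpa using hrl
          simp only [Option.none_or, List.find?_cons]
          rw [h1, Bool.false_and, Bool.false_and]
          rfl

-- ===== B-side lemmas: the reverse painting pass =====

-- the per-row painting loop, as a function of the row alone
def pvPaintRow (row irow : List String) : List String :=
  (List.range irow.length).foldl
    (fun row2 col => if irow.getD col "" ≠ pvNan
                     then row2.set col (irow.getD col "") else row2) row

lemma pvPaintRow_nilrow (irow : List String) : pvPaintRow [] irow = [] := by
  unfold pvPaintRow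
  apply pv_foldl_fix
  intro col
  split <;> rfl

lemma pvB_colfold_length (row irow : List String) (k : Nat) :
    ((List.range k).foldl
      (fun row2 col => if irow.getD col "" ≠ pvNan
                       then row2.set col (irow.getD col "") else row2) row).length = row.length := by
  induction k with
  | zero => rfl
  | succ k ih =>
    rw [List.range_succ, List.foldl_append, List.foldl_cons, List.foldl_nil]
    split
    · rw [List.length_set]; exact ih
    · exact ih

lemma pvB_colfold_getD (row irow : List String) (k : Nat) (c : Nat) (hc : c < row.length) :
    ((List.range k).foldl
      (fun row2 col => if irow.getD col "" ≠ pvNan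
                       then row2.set col (irow.getD col "") else row2) row).getD c "" =
    if c < k ∧ irow.getD c "" ≠ pvNan then irow.getD c "" else row.getD c "" := by
  induction k with
  | zero => simp
  | succ k ih =>
    rw [List.range_succ, List.foldl_append, List.foldl_cons, List.foldl_nil]
    by_cases hcond : irow.getD k "" ≠ pvNan
    · rw [if_pos hcond]
      by_cases hck : c = k
      · subst hck
        rw [List.getD_eq_getElem _ "" (by rw [List.length_set, pvB_colfold_length]; exact hc)]
        rw [if_pos ⟨Nat.lt_succ_self c, hcond⟩]
        simp [List.getElem_set_self]
      · rw [pv_getD_set_ne _ k c _ _ (fun hkc => hck hkc.symm), ih]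
        by_cases hck2 : c < k
        · by_cases h2 : irow.getD c "" ≠ pvNan
          · rw [if_pos ⟨hck2, h2⟩, if_pos ⟨by omega, h2⟩]
          · rw [if_neg (by rintro ⟨-, hh⟩; exact h2 hh), if_neg (by rintro ⟨-, hh⟩; exact h2 hh)]
        · rw [if_neg (by rintro ⟨h1, -⟩; omega), if_neg (by rintro ⟨h1, -⟩; omega)]
    · rw [if_neg hcond, ih]
      by_cases hck : c = k
      · subst hck
        rw [if_neg (by rintro ⟨h1, -⟩; omega), if_neg (by rintro ⟨-, hh⟩; exact hcond hh)]
      · by_cases hck2 : c < k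
        · by_cases h2 : irow.getD c "" ≠ pvNan
          · rw [if_pos ⟨hck2, h2⟩, if_pos ⟨by omega, h2⟩]
          · rw [if_neg (by rintro ⟨-, hh⟩; exact h2 hh), if_neg (by rintro ⟨-, hh⟩; exact h2 hh)]
        · rw [if_neg (by rintro ⟨h1, -⟩; omega), if_neg (by rintro ⟨h1, -⟩; omega)]

lemma pvPaintRow_length (row irow : List String) : (pvPaintRow row irow).length = row.length :=
  pvB_colfold_length row irow irow.length

lemma pvPaintRow_getD (row irow : List String) (c : Nat) (hc : c < row.length) :
    (pvPaintRow row irow).getD c "" =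
    if c < irow.length ∧ irow.getD c "" ≠ pvNan then irow.getD c "" else row.getD c "" :=
  pvB_colfold_getD row irow irow.length c hc

-- the inner painting loop of B only ever rewrites row `fila`
lemma pvB_colfold_set (res : List (List String)) (irow : List String) (fila : Nat)
    (h : fila < res.length) (k : Nat) :
    (List.range k).foldl
      (fun out2 c => if irow.getD c "" ≠ pvNan
                     then out2.set fila ((out2.getD fila []).set c (irow.getD c ""))
                     else out2) res =
    res.set fila ((List.range k).foldl
      (fun row2 col => if irow.getD col "" ≠ pvNan
                       then row2.set col (irow.getD col "") else row2) (res.getD fila [])) := by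
  induction k with
  | zero =>
    rw [List.range_zero, List.foldl_nil, List.foldl_nil,
        List.getD_eq_getElem res [] h, List.set_getElem_self]
  | succ k ih =>
    rw [List.range_succ, List.foldl_append, List.foldl_append, List.foldl_cons, List.foldl_cons,
        List.foldl_nil, List.foldl_nil, ih]
    have hget : ((res.set fila ((List.range k).foldl
        (fun row2 col => if irow.getD col "" ≠ pvNan
                         then row2.set col (irow.getD col "") else row2)
        (res.getD fila []))).getD fila []) =
        (List.range k).foldl
          (fun row2 col => if irow.getD col "" ≠ pvNan
                           then row2.set col (irow.getD col "") else row2) (res.getD fila []) := by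
      rw [List.getD_eq_getElem _ [] (by rw [List.length_set]; exact h)]
      simp
    rw [hget]
    split
    · rw [List.set_set]
    · rfl

-- B's one-instance painting pass: the first k rows, generalized
lemma pvB_paint_aux (res inst : List (List String)) (k : Nat) :
    (((List.range k).foldl
      (fun out r =>
        (List.range ((inst.getD r []).length)).foldl
          (fun out2 c =>
            if (inst.getD r []).getD c "" ≠ pvNan then
              out2.set r ((out2.getD r []).set c ((inst.getD r []).getD c ""))
            else out2)
          out)
      res).length = res.length) ∧
    (∀ r, ((List.range k).foldl
      (fun out r =>
        (List.range ((inst.getD r []).length)).foldl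
          (fun out2 c =>
            if (inst.getD r []).getD c "" ≠ pvNan then
              out2.set r ((out2.getD r []).set c ((inst.getD r []).getD c ""))
            else out2)
          out)
      res).getD r [] =
        if r < k then pvPaintRow (res.getD r []) (inst.getD r []) else res.getD r []) := by
  induction k with
  | zero => exact ⟨rfl, fun r => by simp⟩
  | succ k ih =>
    obtain ⟨ihlen, ihget⟩ := ih
    rw [List.range_succ, List.foldl_append, List.foldl_cons, List.foldl_nil]
    have hGk : ((List.range k).foldl
      (fun out r =>
        (List.range ((inst.getD r []).length)).foldl
          (fun out2 c =>
            if (inst.getD r []).getD c "" ≠ pvNan then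
              out2.set r ((out2.getD r []).set c ((inst.getD r []).getD c ""))
            else out2)
          out)
      res).getD k [] = res.getD k [] := by
      rw [ihget k]; simp
    by_cases hk : k < res.length
    · have hk' : k < ((List.range k).foldl
        (fun out r =>
          (List.range ((inst.getD r []).length)).foldl
            (fun out2 c =>
              if (inst.getD r []).getD c "" ≠ pvNan then
                out2.set r ((out2.getD r []).set c ((inst.getD r []).getD c ""))
              else out2)
            out)
        res).length := by rw [ihlen]; exact hk
      rw [pvB_colfold_set _ (inst.getD k []) k hk', hGk]
      constructor
      · rw [List.length_set]; exact ihlen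
      · intro r
        by_cases hrk : r = k
        · subst hrk
          rw [List.getD_eq_getElem _ [] (by rw [List.length_set]; exact hk')]
          simp only [List.getElem_set_self]
          rw [if_pos (Nat.lt_succ_self r)]
          rfl
        · rw [pv_getD_set_ne _ k r _ _ (fun hkr => hrk hkr.symm), ihget r]
          by_cases hrk2 : r < k
          · rw [if_pos hrk2, if_pos (by omega)]
          · rw [if_neg hrk2, if_neg (by omega)]
    · have hres : res.length ≤ k := by omega
      have hGlen : ((List.range k).foldl
        (fun out r =>
          (List.range ((inst.getD r []).length)).foldl
            (fun out2 c =>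
              if (inst.getD r []).getD c "" ≠ pvNan then
                out2.set r ((out2.getD r []).set c ((inst.getD r []).getD c ""))
              else out2)
            out)
        res).length = res.length := ihlen
      rw [pv_foldl_fix _ _ _ (fun col => by
        split
        · rw [List.set_eq_of_length_le (by rw [hGlen]; omega)]
        · rfl)]
      refine ⟨ihlen, fun r => ?_⟩
      rw [ihget r]
      by_cases hrk : r = k
      · subst hrk
        rw [if_neg (by omega), if_pos (by omega)]
        rw [List.getD_eq_default res [] hres, pvPaintRow_nilrow]
      · by_cases hrk2 : r < k
        · rw [if_pos hrk2, if_pos (by omega)]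
        · rw [if_neg hrk2, if_neg (by omega)]

lemma pvB_paint_spec (res inst : List (List String)) :
    (pvPaintInst res inst).length = res.length ∧
    ∀ r, (pvPaintInst res inst).getD r [] =
      if r < inst.length then pvPaintRow (res.getD r []) (inst.getD r []) else res.getD r [] := by
  unfold pvPaintInst
  exact pvB_paint_aux res inst inst.length

-- the reverse fold of painting passes computes the per-cell first non-'nan' value
lemma pvB_char (out : List (List String)) (l : List (List (List String))) :
    (l.reverse.foldl pvPaintInst out).length = out.length ∧
    (∀ r, ((l.reverse.foldl pvPaintInst out).getD r []).length = (out.getD r []).length) ∧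
    (∀ r c, r < out.length → c < (out.getD r []).length →
      ((l.reverse.foldl pvPaintInst out).getD r []).getD c "" =
        match l.find? (fun inst => decide (r < inst.length) && decide (c < (inst.getD r []).length)
            && ((inst.getD r []).getD c "" != pvNan)) with
        | some inst => (inst.getD r []).getD c ""
        | none => (out.getD r []).getD c "") := by
  induction l with
  | nil => exact ⟨rfl, fun r => rfl, fun r c _ _ => rfl⟩
  | cons inst l' ih =>
    rw [List.reverse_cons, List.foldl_append, List.foldl_cons, List.foldl_nil]
    obtain ⟨ihlen, ihrow, ihcell⟩ := ih
    obtain ⟨plen, pget⟩ := pvB_paint_spec (l'.reverse.foldl pvPaintInst out) inst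
    refine ⟨by rw [plen, ihlen], ?_, ?_⟩
    · intro r
      rw [pget r]
      split
      · rw [pvPaintRow_length]; exact ihrow r
      · exact ihrow r
    · intro r c hr hc
      have hrlen : r < (l'.reverse.foldl pvPaintInst out).length := by rw [ihlen]; exact hr
      have hclen : c < ((l'.reverse.foldl pvPaintInst out).getD r []).length := by
        rw [ihrow r]; exact hc
      rw [pget r, List.find?_cons]
      by_cases hrl : r < inst.length
      · rw [if_pos hrl, pvPaintRow_getD _ _ _ hclen, ihcell r c hr hc]
        by_cases hcond : c < (inst.getD r []).length ∧ (inst.getD r []).getD c "" ≠ pvNan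
        · rw [if_pos hcond]
          have h1 : decide (r < inst.length) = true := by simpa using hrl
          have h2 : decide (c < (inst.getD r []).length) = true := by simpa using hcond.1
          have h3 : ((inst.getD r []).getD c "" != pvNan) = true := by simpa using hcond.2
          rw [h1, h2, h3]
          rfl
        · rw [if_neg hcond]
          rcases Decidable.em (c < (inst.getD r []).length) with h1 | h1
          · have h3 : (inst.getD r []).getD c "" = pvNan := by
              by_contra h3
              exact hcond ⟨h1, h3⟩
            have h3' : ((inst.getD r []).getD c "" != pvNan) = false := by simpa using h3
            rw [h3', Bool.and_false]
          · have h2 : decide (c < (inst.getD r []).length) = false := by simpa using h1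
            rw [h2, Bool.and_false, Bool.false_and]
      · rw [if_neg hrl, ihcell r c hr hc]
        have h1 : decide (r < inst.length) = false := by simpa using hrl
        rw [h1, Bool.false_and, Bool.false_and]

-- ===== VERDICT (by name: the statement is the Claim_ definition above) =====
theorem comparar_instancias_spec : Claim_equal_comparar_instancias := by
  intro m _dom _pre
  unfold Spec_comparar_instancias
  cases m with
  | nil => rfl
  | cons inst0 rest =>
    rw [pv_A_eq_fold]
    obtain ⟨hlen, hrow, hcell⟩ := pv_char inst0 rest
    show rest.foldl pvMergeInst inst0 =
      (inst0 :: rest).reverse.foldl pvPaintInst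
        (inst0.map (fun row => List.replicate row.length pvNan))
    obtain ⟨blen, brow, bcell⟩ :=
      pvB_char (inst0.map (fun row => List.replicate row.length pvNan)) (inst0 :: rest)
    have hlen0 : (inst0.map (fun row => List.replicate row.length pvNan)).length =
        inst0.length := by simp
    have hrow0 : ∀ r, ((inst0.map (fun row => List.replicate row.length pvNan)).getD r []).length
        = (inst0.getD r []).length := by
      intro r
      by_cases hr : r < inst0.length
      · rw [List.getD_eq_getElem _ [] (by rw [hlen0]; exact hr),
            List.getD_eq_getElem _ [] hr]
        simp
      · rw [List.getD_eq_default _ [] (by rw [hlen0]; omega),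
            List.getD_eq_default _ [] (by omega)]
    have hcell0 : ∀ r c, r < inst0.length → c < (inst0.getD r []).length →
        ((inst0.map (fun row => List.replicate row.length pvNan)).getD r []).getD c "" =
          pvNan := by
      intro r c hr hc
      rw [List.getD_eq_getElem _ [] (by rw [hlen0]; exact hr)]
      have hc' : c < inst0[r].length := by rw [← List.getD_eq_getElem inst0 [] hr]; exact hc
      have hc'' : c < (List.replicate inst0[r].length pvNan : List String).length := by
        simpa using hc'
      simp [List.getElem?_eq_getElem hc'']
    apply List.ext_getElem
    · rw [hlen, blen, hlen0]
    · intro r h1 h2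
      have hr0 : r < inst0.length := by rw [← hlen]; exact h1
      rw [← List.getD_eq_getElem _ [] h1, ← List.getD_eq_getElem _ [] h2]
      apply List.ext_getElem
      · rw [hrow r, brow r, hrow0 r]
      · intro c hc1 hc2
        have hc0 : c < (inst0.getD r []).length := by rw [← hrow r]; exact hc1
        rw [← List.getD_eq_getElem _ "" hc1, ← List.getD_eq_getElem _ "" hc2]
        rw [hcell r c hr0 hc0, bcell r c (by rw [hlen0]; exact hr0) (by rw [hrow0 r]; exact hc0)]
        unfold pvFirstValG
        cases (inst0 :: rest).find? (fun inst => decide (r < inst.length)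
            && decide (c < (inst.getD r []).length) && ((inst.getD r []).getD c "" != pvNan)) with
        | some x => rfl
        | none => exact (hcell0 r c hr0 hc0).symm
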